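-- pv_equiv track=rewrite | github.com/manwar/perlweeklychallenge-club | challenge-099/roger-bell-west/python/ch-2.py | us
-- ===== SOURCE A (Python) =====
-- from collections import defaultdict
--
-- def us(text,match):
--     s=defaultdict(list)
--     for i,c in enumerate(text):
--         s[c].append(i)
--     j=list()
--     for c in match:
--         if c in s:
--             j.append(s[c])
--         else:
--             return 0
--     o=list();
--     for i in range(len(j[0])):
--         o.append(1)
--     for m in range(1,len(j)):
--         n=list()
--         for bi in range(len(j[m])):
--             t=0
--             for ai in range(len(j[m-1])):
--                 if j[m-1][ai] < j[m][bi]: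
--                     t += o[ai]
--             n.append(t)
--         o=n
--     return sum(o)
-- ===== SOURCE B (Python) =====
-- from collections import defaultdict
--
-- def us(text, match):
--     s = defaultdict(list)
--     for i, c in enumerate(text):
--         s[c].append(i)
--     cols = []
--     for c in match:
--         if c not in s:
--             return 0
--         cols.append(s[c])
--     o = [1] * len(cols[0])
--     for m in range(1, len(cols)):
--         prev = cols[m - 1]
--         cur = cols[m]
--         pref = [0]
--         for v in o:
--             pref.append(pref[-1] + v)
--         k = 0
--         n = []
--         for b in cur:
--             while k < len(prev) and prev[k] < b:
--                 k += 1
--             n.append(pref[k])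
--         o = n
--     return sum(o)
-- ===== Notes on version B (the rewrite author's own statement) =====
-- stated objective: faster
-- what changed: The per-stage quadratic inner scan over the previous position list is replaced by prefix sums of the running count vector plus a single monotone two-pointer sweep, exploiting that position lists are ascending.
import Mathlib
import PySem

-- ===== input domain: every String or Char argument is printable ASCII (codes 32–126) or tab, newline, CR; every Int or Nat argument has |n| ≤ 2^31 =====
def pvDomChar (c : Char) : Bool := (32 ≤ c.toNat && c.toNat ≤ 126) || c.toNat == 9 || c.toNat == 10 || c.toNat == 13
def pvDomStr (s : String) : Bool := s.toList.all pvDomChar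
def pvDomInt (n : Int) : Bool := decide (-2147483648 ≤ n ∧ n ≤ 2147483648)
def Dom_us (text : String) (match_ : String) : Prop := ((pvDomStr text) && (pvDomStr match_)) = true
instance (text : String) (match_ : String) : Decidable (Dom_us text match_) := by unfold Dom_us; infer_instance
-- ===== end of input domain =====

-- B replaces A's quadratic inner scan over the previous position list by prefix sums of the
-- running count vector plus a single monotone two-pointer sweep (position lists are ascending),
-- turning each stage from O(occ_prev * occ_cur) into O(occ_prev + occ_cur).

-- ===== PORT A =====
def usDict (tl : List Char) : PySem.Dict Char (List Int) :=
  (PySem.List.enumerate tl 0).foldl (fun d p => d.modify p.2 [] (fun l => l ++ [p.1])) PySem.Dict.empty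

def usColsA (s : PySem.Dict Char (List Int)) : List Char → Option (List (List Int))
  | [] => some []
  | c :: cs => if s.contains c then (usColsA s cs).map (fun r => s.getD c [] :: r) else none

def us (text : String) (match_ : String) : Int :=
  let s := usDict text.toList
  match usColsA s match_.toList with
  | none => 0
  | some j =>
    let o0 : List Int := (PySem.List.pyRange 0 ((PySem.List.pyGetD j 0 []).length : Int) 1).foldl
      (fun o _ => o ++ [(1 : Int)]) []
    let oN := (PySem.List.pyRange 1 (j.length : Int) 1).foldl (fun o m =>
        (PySem.List.pyRange 0 ((PySem.List.pyGetD j m []).length : Int) 1).foldl (fun n bi =>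
          n ++ [(PySem.List.pyRange 0 ((PySem.List.pyGetD j (m-1) []).length : Int) 1).foldl (fun t ai =>
            if PySem.List.pyGetD (PySem.List.pyGetD j (m-1) []) ai 0 <
               PySem.List.pyGetD (PySem.List.pyGetD j m []) bi 0
            then t + PySem.List.pyGetD o ai 0 else t) (0 : Int)]) []) o0
    oN.sum

-- ===== PORT B =====
def usColsB (s : PySem.Dict Char (List Int)) : List Char → Option (List (List Int))
  | [] => some []
  | c :: cs => if s.contains c = false then none else (usColsB s cs).map (fun r => s.getD c [] :: r)

def usAdvance (prev : List Int) (b : Int) (k : Int) : Int :=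
  if h : k < (prev.length : Int) ∧ PySem.List.pyGetD prev k 0 < b then usAdvance prev b (k + 1) else k
termination_by ((prev.length : Int) - k).toNat
decreasing_by omega

def us_alt (text : String) (match_ : String) : Int :=
  let s := usDict text.toList
  match usColsB s match_.toList with
  | none => 0
  | some cols =>
    let o0 : List Int := List.replicate (PySem.List.pyGetD cols 0 []).length (1 : Int)
    let oN := (PySem.List.pyRange 1 (cols.length : Int) 1).foldl (fun o m =>
        let prev := PySem.List.pyGetD cols (m-1) []
        let cur := PySem.List.pyGetD cols m []
        let pref := o.foldl (fun pref v => pref ++ [PySem.List.pyGetD pref (-1) 0 + v]) [(0 : Int)]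
        (cur.foldl (fun (st : Int × List Int) b =>
           let k := usAdvance prev b st.1
           (k, st.2 ++ [PySem.List.pyGetD pref k 0])) ((0 : Int), ([] : List Int))).2) o0
    oN.sum

-- ===== PRECONDITION & SPEC =====
-- Pre_ excludes only the empty match string, on which Python A (and B) raise IndexError (j[0]).
def Pre_us (text : String) (match_ : String) : Prop := match_ ≠ ""
instance (text : String) (match_ : String) : Decidable (Pre_us text match_) := by unfold Pre_us; infer_instance
def pvWitness_us : String × String := ("abcabc", "abc")
def Spec_us (text : String) (match_ : String) (out : Int) : Prop := out = us_alt text match_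
instance (text : String) (match_ : String) (out : Int) : Decidable (Spec_us text match_ out) := by unfold Spec_us; infer_instance

-- ===== CLAIM (what is proved, stated in full; the proofs are below) =====
def Claim_equal_us : Prop := ∀ (text : String) (match_ : String), Dom_us text match_ → Pre_us text match_ → Spec_us text match_ (us text match_)

-- ===== LEMMAS AND PROOFS =====

-- number of elements of l below b (the quantity both stage loops are driven by)
def cntLt (l : List Int) (b : Int) : Nat := l.countP (fun x => decide (x < b))

-- the common value of one stage at cur-position b: sum of the first cntLt prev b entries of o
def stageVal (prev o : List Int) (b : Int) : Int := (o.take (cntLt prev b)).sum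

theorem cntLt_le_length (l : List Int) (b : Int) : cntLt l b ≤ l.length :=
  List.countP_le_length

theorem cntLt_mono (l : List Int) {b b' : Int} (h : b ≤ b') : cntLt l b ≤ cntLt l b' := by
  unfold cntLt
  exact List.countP_mono_left (fun x _ hx => by simp_all; omega)

theorem sorted_lt_iff {l : List Int} (hs : l.Pairwise (· ≤ ·)) (b : Int) (i : Nat) (hi : i < l.length) :
    l[i] < b ↔ i < cntLt l b := by
  induction l generalizing i with
  | nil => simp at hi
  | cons x t ih =>
    rcases List.pairwise_cons.mp hs with ⟨hx, ht⟩
    by_cases hxb : x < b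
    · have hc : cntLt (x :: t) b = cntLt t b + 1 := by
        simp [cntLt, hxb]
      cases i with
      | zero => simpa [hc] using hxb
      | succ n =>
        simp only [List.getElem_cons_succ, hc]
        rw [ih ht n (by simpa using hi)]
        omega
    · have hc : cntLt (x :: t) b = 0 := by
        simp [cntLt, hxb, List.countP_eq_zero]
        intro y hy
        exact le_trans (le_of_not_gt hxb) (hx y hy)
      cases i with
      | zero => simpa [hc] using hxb
      | succ n =>
        simp only [List.getElem_cons_succ, hc]
        constructor
        · intro h2
          exact absurd (lt_of_le_of_lt (hx _ (List.getElem_mem _)) h2) hxb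
        · omega

theorem advance_eq {prev : List Int} (hs : prev.Pairwise (· ≤ ·)) (b : Int) (k : Int)
    (h0 : 0 ≤ k) (hk : k ≤ (cntLt prev b : Int)) : usAdvance prev b k = cntLt prev b := by
  have hcl := cntLt_le_length prev b
  by_cases heq : k = (cntLt prev b : Int)
  · subst heq
    rw [usAdvance]
    rw [dif_neg]
    rintro ⟨h1, h2⟩
    have hin : (cntLt prev b) < prev.length := by omega
    rw [PySem.List.pyGetD_eq_getElem _ _ (by omega) (by omega)] at h2
    have := (sorted_lt_iff hs b _ (by simpa using hin)).mp (by simpa using h2)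
    omega
  · have hlt : k < (cntLt prev b : Int) := lt_of_le_of_ne hk heq
    rw [usAdvance, dif_pos]
    · exact advance_eq hs b (k+1) (by omega) (by omega)
    · constructor
      · omega
      · have hkn : k.toNat < prev.length := by omega
        rw [PySem.List.pyGetD_eq_getElem _ _ h0 (by omega)]
        exact (sorted_lt_iff hs b k.toNat hkn).mpr (by omega)
termination_by (cntLt prev b - k).toNat
decreasing_by omega

theorem filter_eq_take_cntLt {z : List (Int × Int)} (hs : (z.map Prod.fst).Pairwise (· ≤ ·)) (b : Int) :
    z.filter (fun q => decide (q.1 < b)) = z.take (z.countP (fun q => decide (q.1 < b))) := by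
  induction z with
  | nil => simp
  | cons q t ih =>
    rw [List.map_cons, List.pairwise_cons] at hs
    obtain ⟨hq, ht⟩ := hs
    by_cases hqb : q.1 < b
    · simp only [List.filter_cons, List.countP_cons, hqb, decide_true, if_pos, List.take_succ_cons]
      simp [ih ht]
    · have h0 : t.countP (fun q => decide (q.1 < b)) = 0 := by
        rw [List.countP_eq_zero]
        intro y hy
        simp only [decide_eq_true_eq]
        have : q.1 ≤ y.1 := hq y.1 (List.mem_map_of_mem hy)
        omega
      have h0' : t.filter (fun q => decide (q.1 < b)) = [] := by
        rw [List.filter_eq_nil_iff]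
        intro y hy
        have : q.1 ≤ y.1 := hq y.1 (List.mem_map_of_mem hy)
        simp only [decide_eq_true_eq]
        omega
      simp [hqb, h0, h0']

theorem innerA_eq (prev o : List Int) (b : Int) (hs : prev.Pairwise (· ≤ ·)) (hl : o.length = prev.length) :
    (PySem.List.pyRange 0 (prev.length : Int) 1).foldl (fun t ai =>
      if PySem.List.pyGetD prev ai 0 < b then t + PySem.List.pyGetD o ai 0 else t) (0 : Int)
    = stageVal prev o b := by
  set z := prev.zip o with hz
  have hzl : z.length = prev.length := by simp [hz, hl]
  have step1 : (PySem.List.pyRange 0 (prev.length : Int) 1).foldl (fun t ai =>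
      if PySem.List.pyGetD prev ai 0 < b then t + PySem.List.pyGetD o ai 0 else t) (0 : Int)
    = (PySem.List.pyRange 0 ((z.length : Nat) : Int) 1).foldl (fun t ai =>
      if (PySem.List.pyGetD z ai (0,0)).1 < b then t + (PySem.List.pyGetD z ai (0,0)).2 else t) (0 : Int) := by
    rw [hzl]
    apply PySem.List.foldl_congr_mem
    intro acc ai hai
    rw [PySem.List.mem_pyRange_one] at hai
    have h1 : ai < (z.length : Int) := by omega
    rw [PySem.List.pyGetD_eq_getElem z (0,0) hai.1 (by omega),
        PySem.List.pyGetD_eq_getElem prev 0 hai.1 (by omega),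
        PySem.List.pyGetD_eq_getElem o 0 hai.1 (by omega)]
    simp [hz, List.getElem_zip]
  rw [step1, PySem.List.foldl_pyRange_zero_pyGetD' z (0,0)
      (fun t q => if q.1 < b then t + q.2 else t) 0]
  have step3 : List.foldl (fun t q => if q.1 < b then t + q.2 else t) 0 z
      = ((z.filter (fun q => decide (q.1 < b))).map Prod.snd).sum := by
    rw [PySem.List.foldl_ite_eq_foldl_filter, PySem.List.foldl_add]
    simp
  rw [step3, filter_eq_take_cntLt (by simpa [hz, List.map_fst_zip (l₁ := prev) (l₂ := o) hl.ge] using hs) b]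
  have hcnt : z.countP (fun q => decide (q.1 < b)) = cntLt prev b := by
    have : prev = z.map Prod.fst := by simp [hz, List.map_fst_zip (l₁ := prev) (l₂ := o) hl.ge]
    rw [cntLt, this, List.countP_map]
    rfl
  rw [hcnt, stageVal]
  have hms : List.map Prod.snd (z.take (cntLt prev b)) = o.take (cntLt prev b) := by
    rw [List.map_take, List.map_snd_zip (l₁ := prev) (l₂ := o) hl.le]
  rw [hms]

theorem stageA_eq (prev cur o : List Int) (hs : prev.Pairwise (· ≤ ·)) (hl : o.length = prev.length) :
    (PySem.List.pyRange 0 (cur.length : Int) 1).foldl (fun n bi =>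
      n ++ [(PySem.List.pyRange 0 (prev.length : Int) 1).foldl (fun t ai =>
        if PySem.List.pyGetD prev ai 0 < PySem.List.pyGetD cur bi 0
        then t + PySem.List.pyGetD o ai 0 else t) (0 : Int)]) []
    = cur.map (stageVal prev o) := by
  rw [PySem.List.foldl_append_singleton_eq_map
      (fun bi => (PySem.List.pyRange 0 (prev.length : Int) 1).foldl (fun t ai =>
        if PySem.List.pyGetD prev ai 0 < PySem.List.pyGetD cur bi 0
        then t + PySem.List.pyGetD o ai 0 else t) (0 : Int))]
  have hcomp : (fun bi => (PySem.List.pyRange 0 (prev.length : Int) 1).foldl (fun t ai =>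
        if PySem.List.pyGetD prev ai 0 < PySem.List.pyGetD cur bi 0
        then t + PySem.List.pyGetD o ai 0 else t) (0 : Int))
      = (fun b => (PySem.List.pyRange 0 (prev.length : Int) 1).foldl (fun t ai =>
        if PySem.List.pyGetD prev ai 0 < b
        then t + PySem.List.pyGetD o ai 0 else t) (0 : Int)) ∘ (fun bi => PySem.List.pyGetD cur bi 0) := rfl
  rw [hcomp, ← List.map_map, PySem.List.map_pyGetD_pyRange_zero' cur 0]
  simp only [List.nil_append]
  exact List.map_congr_left (fun b _ => innerA_eq prev o _ hs hl)

theorem pref_spec (o : List Int) :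
    o.foldl (fun pref v => pref ++ [PySem.List.pyGetD pref (-1) 0 + v]) [(0 : Int)]
    = (List.range (o.length + 1)).map (fun n => (o.take n).sum) := by
  induction o using List.reverseRecOn with
  | nil => simp
  | append_singleton t v ih =>
    rw [List.foldl_append, ih]
    have hsplit : (List.range (t.length + 1)).map (fun n => (t.take n).sum)
        = (List.range t.length).map (fun n => (t.take n).sum) ++ [t.sum] := by
      rw [List.range_succ, List.map_append]
      simp
    rw [List.foldl_cons, List.foldl_nil, hsplit, PySem.List.pyGetD_neg_one_append_singleton]
    have hsplit2 : (List.range (t.length + 1 + 1)).map (fun n => ((t ++ [v]).take n).sum)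
        = ((List.range (t.length + 1)).map (fun n => ((t ++ [v]).take n).sum)) ++ [(t ++ [v]).sum] := by
      rw [List.range_succ, List.map_append]
      simp
    simp only [List.length_append, List.length_cons, List.length_nil, Nat.zero_add, hsplit2]
    congr 1
    · rw [← hsplit]
      apply List.map_congr_left
      intro n hn
      rw [List.mem_range] at hn
      rw [List.take_append_of_le_length (by omega)]
    · simp

theorem pref_get (o : List Int) (n : Nat) (hn : n ≤ o.length) :
    PySem.List.pyGetD ((List.range (o.length + 1)).map (fun n => (o.take n).sum)) (n : Int) 0
    = (o.take n).sum := by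
  rw [PySem.List.pyGetD_natCast]
  rw [List.getD_eq_getElem?_getD, List.getElem?_map, List.getElem?_range (by omega)]
  rfl

theorem stageB_aux (prev o : List Int) (hs : prev.Pairwise (· ≤ ·)) (hl : o.length = prev.length)
    (cur : List Int) (hc : cur.Pairwise (· ≤ ·)) :
    ∀ (k0 : Int) (acc : List Int), 0 ≤ k0 → (∀ b ∈ cur, k0 ≤ (cntLt prev b : Int)) →
    (cur.foldl (fun (st : Int × List Int) b =>
        (usAdvance prev b st.1,
         st.2 ++ [PySem.List.pyGetD (o.foldl (fun pref v => pref ++ [PySem.List.pyGetD pref (-1) 0 + v]) [(0 : Int)]) (usAdvance prev b st.1) 0])) (k0, acc)).2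
    = acc ++ cur.map (stageVal prev o) := by
  induction cur with
  | nil => intro k0 acc _ _; simp
  | cons b t ih =>
    intro k0 acc h0 hk
    rw [List.pairwise_cons] at hc
    obtain ⟨hb, ht⟩ := hc
    have hcnt : usAdvance prev b k0 = cntLt prev b :=
      advance_eq hs b k0 h0 (hk b List.mem_cons_self)
    have hval : PySem.List.pyGetD (o.foldl (fun pref v => pref ++ [PySem.List.pyGetD pref (-1) 0 + v]) [(0 : Int)]) ((cntLt prev b : Nat) : Int) 0 = stageVal prev o b := by
      rw [pref_spec, pref_get o (cntLt prev b) (by rw [hl]; exact cntLt_le_length prev b)]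
      rfl
    rw [List.foldl_cons]
    simp only [hcnt, hval]
    rw [ih ht (cntLt prev b) (acc ++ [stageVal prev o b]) (by positivity)
        (fun b' hb' => by exact_mod_cast cntLt_mono prev (hb b' hb'))]
    simp

theorem stageB_eq (prev cur o : List Int) (hs : prev.Pairwise (· ≤ ·)) (hc : cur.Pairwise (· ≤ ·))
    (hl : o.length = prev.length) :
    (cur.foldl (fun (st : Int × List Int) b =>
        (usAdvance prev b st.1,
         st.2 ++ [PySem.List.pyGetD (o.foldl (fun pref v => pref ++ [PySem.List.pyGetD pref (-1) 0 + v]) [(0 : Int)]) (usAdvance prev b st.1) 0])) ((0 : Int), ([] : List Int))).2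
    = cur.map (stageVal prev o) := by
  rw [stageB_aux prev o hs hl cur hc 0 [] le_rfl (fun b _ => by positivity)]
  simp

theorem usDict_getD (tl : List Char) (c : Char) :
    (usDict tl).getD c [] = ((PySem.List.enumerate tl 0).filter (fun p => p.2 == c)).map (·.1) := by
  unfold usDict
  have h : (PySem.List.enumerate tl 0).foldl (fun d p => d.modify p.2 [] (fun l => l ++ [p.1])) PySem.Dict.empty
      = ((PySem.List.enumerate tl 0).map (fun p => (p.2, p.1))).foldl
          (fun d q => d.modify q.1 [] (fun l => l ++ [q.2])) PySem.Dict.empty := by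
    rw [List.foldl_map]
  rw [h, PySem.Dict.getD_foldl_modify_append]
  simp [List.filter_map, List.map_map, Function.comp_def]

theorem usDict_getD_sorted (tl : List Char) (c : Char) :
    ((usDict tl).getD c []).Pairwise (· ≤ ·) := by
  rw [usDict_getD]
  rw [List.pairwise_map]
  exact ((PySem.List.pairwise_lt_enumerate tl 0).filter _).imp (fun h => le_of_lt h)

theorem usColsB_eq_usColsA (s : PySem.Dict Char (List Int)) (l : List Char) :
    usColsB s l = usColsA s l := by
  induction l with
  | nil => rfl
  | cons c cs ih =>
    unfold usColsA usColsB
    cases h : s.contains c <;> simp [h, ih]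

theorem usColsA_some {s : PySem.Dict Char (List Int)} {l : List Char} {j : List (List Int)}
    (h : usColsA s l = some j) : j = l.map (fun c => s.getD c []) := by
  induction l generalizing j with
  | nil => simp [usColsA] at h; simp [h.symm]
  | cons c cs ih =>
    unfold usColsA at h
    by_cases hc : s.contains c
    · simp [hc] at h
      obtain ⟨r, hr, hj⟩ := h
      rw [List.map_cons, ← ih hr, hj]
    · simp [hc] at h

theorem o0_eq (L : Nat) :
    (PySem.List.pyRange 0 (L : Int) 1).foldl (fun o _ => o ++ [(1 : Int)]) []
    = List.replicate L (1 : Int) := by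
  rw [PySem.List.foldl_append_singleton_eq_map (fun _ => (1 : Int))]
  simp [List.map_const', PySem.List.length_pyRange_one]

theorem toList_ne_nil (s : String) (h : s ≠ "") : s.toList ≠ [] := by
  intro hn
  apply h
  have := congrArg String.ofList hn
  simpa using this

theorem outer_eq (j : List (List Int))
    (hsort : ∀ m : Nat, m < j.length → (PySem.List.pyGetD j (m : Int) []).Pairwise (· ≤ ·))
    (o0 : List Int) (hlen0 : o0.length = (PySem.List.pyGetD j 0 []).length)
    (N : Nat) (h1 : 1 ≤ N) (hN : N ≤ j.length) :
    (PySem.List.pyRange 1 (N : Int) 1).foldl (fun o m =>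
        (PySem.List.pyRange 0 ((PySem.List.pyGetD j m []).length : Int) 1).foldl (fun n bi =>
          n ++ [(PySem.List.pyRange 0 ((PySem.List.pyGetD j (m-1) []).length : Int) 1).foldl (fun t ai =>
            if PySem.List.pyGetD (PySem.List.pyGetD j (m-1) []) ai 0 <
               PySem.List.pyGetD (PySem.List.pyGetD j m []) bi 0
            then t + PySem.List.pyGetD o ai 0 else t) (0 : Int)]) []) o0
    = (PySem.List.pyRange 1 (N : Int) 1).foldl (fun o m =>
        ((PySem.List.pyGetD j m []).foldl (fun (st : Int × List Int) b =>
           (usAdvance (PySem.List.pyGetD j (m-1) []) b st.1,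
            st.2 ++ [PySem.List.pyGetD (o.foldl (fun pref v => pref ++ [PySem.List.pyGetD pref (-1) 0 + v]) [(0 : Int)]) (usAdvance (PySem.List.pyGetD j (m-1) []) b st.1) 0]))
           ((0 : Int), ([] : List Int))).2) o0
    ∧ ((PySem.List.pyRange 1 (N : Int) 1).foldl (fun o m =>
        (PySem.List.pyRange 0 ((PySem.List.pyGetD j m []).length : Int) 1).foldl (fun n bi =>
          n ++ [(PySem.List.pyRange 0 ((PySem.List.pyGetD j (m-1) []).length : Int) 1).foldl (fun t ai =>
            if PySem.List.pyGetD (PySem.List.pyGetD j (m-1) []) ai 0 <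
               PySem.List.pyGetD (PySem.List.pyGetD j m []) bi 0
            then t + PySem.List.pyGetD o ai 0 else t) (0 : Int)]) []) o0).length
      = (PySem.List.pyGetD j ((N - 1 : Nat) : Int) []).length := by
  induction N, h1 using Nat.le_induction with
  | base =>
    rw [PySem.List.pyRange_one_eq_nil (by norm_num)]
    simpa using hlen0
  | succ N h1 ih =>
    obtain ⟨ihEq, ihLen⟩ := ih (by omega)
    have hrng : PySem.List.pyRange 1 ((N + 1 : Nat) : Int) 1
        = PySem.List.pyRange 1 (N : Int) 1 ++ [(N : Int)] := by
      push_cast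
      exact PySem.List.pyRange_one_succ_right (by exact_mod_cast h1)
    have hm1 : ((N : Int) - 1) = ((N - 1 : Nat) : Int) := by omega
    have hsub : ((N + 1 : Nat) - 1 : Nat) = N := by omega
    set prev := PySem.List.pyGetD j ((N - 1 : Nat) : Int) [] with hprev
    set cur := PySem.List.pyGetD j (N : Int) [] with hcur
    have hps : prev.Pairwise (· ≤ ·) := hsort (N - 1) (by omega)
    have hcs : cur.Pairwise (· ≤ ·) := hsort N (by omega)
    rw [hrng]
    simp only [List.foldl_append, List.foldl_cons, List.foldl_nil]
    rw [← ihEq]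
    set fA := (PySem.List.pyRange 1 (N : Int) 1).foldl (fun o m =>
        (PySem.List.pyRange 0 ((PySem.List.pyGetD j m []).length : Int) 1).foldl (fun n bi =>
          n ++ [(PySem.List.pyRange 0 ((PySem.List.pyGetD j (m-1) []).length : Int) 1).foldl (fun t ai =>
            if PySem.List.pyGetD (PySem.List.pyGetD j (m-1) []) ai 0 <
               PySem.List.pyGetD (PySem.List.pyGetD j m []) bi 0
            then t + PySem.List.pyGetD o ai 0 else t) (0 : Int)]) []) o0 with hfA
    have hlen : fA.length = prev.length := by rw [ihLen]
    constructor
    · rw [hm1, ← hprev, ← hcur]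
      rw [stageA_eq prev cur fA hps hlen, stageB_eq prev cur fA hps hcs hlen]
    · rw [hm1, ← hprev, ← hcur]
      rw [stageA_eq prev cur fA hps hlen]
      simp only [List.length_map, hsub]
      rw [hcur]

-- ===== VERDICT (by name: the statement is the Claim_ definition above) =====
theorem us_spec : Claim_equal_us := by
  unfold Claim_equal_us Spec_us
  intro text match_ _ hpre
  simp only [us, us_alt, usColsB_eq_usColsA]
  cases h : usColsA (usDict text.toList) match_.toList with
  | none => rfl
  | some j =>
    simp only []
    have hj := usColsA_some h
    have hsort : ∀ m : Nat, m < j.length → (PySem.List.pyGetD j (m : Int) []).Pairwise (· ≤ ·) := by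
      intro m hm
      rw [PySem.List.pyGetD_natCast, hj, List.getD_eq_getElem?_getD, List.getElem?_map]
      cases hx : match_.toList[m]? with
      | none => simp
      | some c => simpa using usDict_getD_sorted text.toList c
    have h1 : 1 ≤ j.length := by
      rw [hj, List.length_map]
      exact List.length_pos_of_ne_nil (toList_ne_nil match_ hpre)
    obtain ⟨hEq, -⟩ := outer_eq j hsort (List.replicate (PySem.List.pyGetD j 0 []).length 1)
      (by rw [List.length_replicate]) j.length h1 le_rfl
    rw [o0_eq]
    exact congrArg List.sum hEq
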